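-- pv_equiv track=rewrite | github.com/clemnyan/TMLR_Reward_Distances_SRRD | kNN_classification/IRL Algorithms/PTIRL/ToyDTMs/L_MDP.py | disjoinTrajectorySets
-- ===== SOURCE A (Python) =====
-- def disjoinTrajectorySets(trajectory_lists):
--     # trajectory_lists is a list of lists of trajectories of the form [ s1, a1, s2, a2, ..., sn ] being integer indices
--     # Returns a tuple ( preserved_trajectories_indices, new_trajectory_lists, trajectory_to_location )
--     #   -- preserved_trajectories_indices is a newly created list of lists of the position index of trajectories
--     #       in a trajectory list that have been kept.
--     #   -- new_trajectory_lists is a newly created disjoint list where each list of trajectories is a subsequence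
--     #       of the corresponding original list; ordering of the trajectories is also preserved.
--     #       In the case of duplicate trajectories in a single list, only the first one is kept.
--     #   -- trajectory_to_location is a dictionary that maps each trajectry (as a tuple) to a set of tuples
--     #       where l_idx is the index of the original trajectory list and pos is the position of this trajectory in
--     #       that list; handles mutiple occurrances of a trajectory including repeats is a single list.
--
--     trajectory_to_location = dict()
--         # Maps a single trajectory to a set of tuples ( l_idx, pos ) where l_idx is the index of a trajectory list
--         #   and pos is the position of this trajectory in that list
--     new_trajectory_lists = list()
--         # The new disjoint trajectory lists
--     preserved_trajectories_indices = list()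
--         # This is a list of lists of the positions of trajectories that remain in the new_trajectory_lists
--
--     for l_idx, traj_list in enumerate(trajectory_lists):
--         new_list = list()
--         new_trajectory_lists.append(new_list)
--         new_preserved = list()
--         preserved_trajectories_indices.append(new_preserved)
--         for pos, traj in enumerate(traj_list):
--             try:
--                 trajectory_to_location[tuple(traj)].add(( l_idx, pos ))
--             except KeyError:
--                 trajectory_to_location[tuple(traj)] = set()
--                 trajectory_to_location[tuple(traj)].add(( l_idx, pos ))
--                 new_list.append(traj)
--                 new_preserved.append(pos)
--
--     return ( preserved_trajectories_indices, new_trajectory_lists, trajectory_to_location )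
-- ===== SOURCE B (Python) =====
-- def disjoinTrajectorySets(trajectory_lists):
--     # Two-pass, table-driven version: first build the full occurrence index,
--     # then keep exactly the representative (minimal = first-encountered) occurrence.
--     trajectory_to_location = dict()
--     for l_idx, traj_list in enumerate(trajectory_lists):
--         for pos, traj in enumerate(traj_list):
--             trajectory_to_location.setdefault(tuple(traj), set()).add((l_idx, pos))
--
--     new_trajectory_lists = list()
--     preserved_trajectories_indices = list()
--     for l_idx, traj_list in enumerate(trajectory_lists):
--         new_list = list()
--         new_preserved = list()
--         for pos, traj in enumerate(traj_list):
--             if min(trajectory_to_location[tuple(traj)]) == (l_idx, pos):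
--                 new_list.append(traj)
--                 new_preserved.append(pos)
--         new_trajectory_lists.append(new_list)
--         preserved_trajectories_indices.append(new_preserved)
--
--     return (preserved_trajectories_indices, new_trajectory_lists, trajectory_to_location)
-- ===== Notes on version B (the rewrite author's own statement) =====
-- stated objective: alternative
-- what changed: B first builds the complete trajectory->occurrence index in one pass, then in a second pass keeps an occurrence exactly when it is the minimum (= first-encountered) element of that trajectory's fully built occurrence set, instead of A's inline seen-before test on the dict under construction.
import Mathlib
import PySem

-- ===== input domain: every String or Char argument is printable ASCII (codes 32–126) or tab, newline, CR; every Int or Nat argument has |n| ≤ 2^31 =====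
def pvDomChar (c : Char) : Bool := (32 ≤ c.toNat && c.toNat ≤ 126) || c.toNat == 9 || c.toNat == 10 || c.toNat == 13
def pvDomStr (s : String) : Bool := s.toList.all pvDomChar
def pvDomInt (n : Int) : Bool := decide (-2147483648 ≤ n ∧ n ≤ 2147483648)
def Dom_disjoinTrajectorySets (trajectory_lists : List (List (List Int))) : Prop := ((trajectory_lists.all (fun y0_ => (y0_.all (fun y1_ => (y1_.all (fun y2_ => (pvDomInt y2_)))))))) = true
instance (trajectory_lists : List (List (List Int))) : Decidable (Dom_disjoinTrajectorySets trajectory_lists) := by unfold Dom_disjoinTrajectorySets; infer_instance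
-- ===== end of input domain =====

-- B replaces A's inline "first time this trajectory is seen" test by a two-pass, table-driven
-- scheme: build the full occurrence index first, then keep an occurrence iff it is the minimum
-- of its trajectory's fully built occurrence set (objective: alternative decomposition, not speed).

-- ===== PORT A =====
-- state: (trajectory_to_location, preserved_trajectories_indices, new_trajectory_lists);
-- Python appends new_list/new_preserved before mutating them in place — here we run the
-- inner loop first and append its finished lists, which yields the same final values.
def disjoinTrajectorySets (trajectory_lists : List (List (List Int))) : List (List Int) × List (List (List Int)) × (List (List Int × List (Int × Int))) :=
  let st := (PySem.List.enumerate trajectory_lists).foldl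
    (fun st lt =>
      let inner := (PySem.List.enumerate lt.2).foldl
        (fun st2 pt =>
          -- try: d[tuple(traj)].add((l_idx,pos)) / except KeyError: d[tuple(traj)] = set(); add; append
          match st2.1.get? pt.2 with
          | some s => (st2.1.insert pt.2 (PySem.Set.add s (lt.1, pt.1)), st2.2.1, st2.2.2)
          | none => (st2.1.insert pt.2 (PySem.Set.add PySem.Set.empty (lt.1, pt.1)),
                     st2.2.1 ++ [pt.2], st2.2.2 ++ [pt.1]))
        (st.1, ([] : List (List Int)), ([] : List Int))
      (inner.1, st.2.1 ++ [inner.2.2], st.2.2 ++ [inner.2.1]))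
    ((PySem.Dict.empty : PySem.Dict (List Int) (PySem.Set (Int × Int))), ([] : List (List Int)), ([] : List (List (List Int))))
  (st.2.1, st.2.2, st.1.items)

-- ===== PORT B =====
-- first pass: trajectory_to_location.setdefault(tuple(traj), set()).add((l_idx, pos))
-- which is exactly d[k] = d.get(k, set()) ∪ {x}, i.e. Dict.modify.
def disjoinTrajectorySets_alt (trajectory_lists : List (List (List Int))) : List (List Int) × List (List (List Int)) × (List (List Int × List (Int × Int))) :=
  let d := (PySem.List.enumerate trajectory_lists).foldl
    (fun d lt => (PySem.List.enumerate lt.2).foldl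
        (fun d pt => d.modify pt.2 PySem.Set.empty (fun s => PySem.Set.add s (lt.1, pt.1))) d)
    (PySem.Dict.empty : PySem.Dict (List Int) (PySem.Set (Int × Int)))
  -- second pass: keep (l_idx, pos) iff it equals min(trajectory_to_location[tuple(traj)]).
  -- d[tuple(traj)] is always present here (built over the same elements), so getD is exact;
  -- min over the nonempty set of int pairs is lexicographic: PySem.List.min2?.
  let st := (PySem.List.enumerate trajectory_lists).foldl
    (fun st lt =>
      let inner := (PySem.List.enumerate lt.2).foldl
        (fun st2 pt =>
          if PySem.List.min2? (d.getD pt.2 PySem.Set.empty) (fun q => q.1) (fun q => q.2) == some (lt.1, pt.1)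
          then (st2.1 ++ [pt.2], st2.2 ++ [pt.1]) else st2)
        (([] : List (List Int)), ([] : List Int))
      (st.1 ++ [inner.2], st.2 ++ [inner.1]))
    (([] : List (List Int)), ([] : List (List (List Int))))
  (st.1, st.2, d.items)

-- ===== PRECONDITION & SPEC =====
def Spec_disjoinTrajectorySets (trajectory_lists : List (List (List Int))) (out : List (List Int) × List (List (List Int)) × (List (List Int × List (Int × Int)))) : Prop := out = disjoinTrajectorySets_alt trajectory_lists
instance (trajectory_lists : List (List (List Int))) (out : List (List Int) × List (List (List Int)) × (List (List Int × List (Int × Int)))) : Decidable (Spec_disjoinTrajectorySets trajectory_lists out) := by unfold Spec_disjoinTrajectorySets; infer_instance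

-- ===== CLAIM (what is proved, stated in full; the proofs are below) =====
def Claim_equal_disjoinTrajectorySets : Prop := ∀ (trajectory_lists : List (List (List Int))), Dom_disjoinTrajectorySets trajectory_lists → Spec_disjoinTrajectorySets trajectory_lists (disjoinTrajectorySets trajectory_lists)

-- ===== LEMMAS AND PROOFS =====

-- an event is (l_idx, pos, traj)
def pvStep (d : PySem.Dict (List Int) (PySem.Set (Int × Int))) (e : Int × Int × List Int) : PySem.Dict (List Int) (PySem.Set (Int × Int)) :=
  d.modify e.2.2 PySem.Set.empty (fun s => PySem.Set.add s (e.1, e.2.1))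

def pvBuild (L : List (Int × Int × List Int)) (d : PySem.Dict (List Int) (PySem.Set (Int × Int))) : PySem.Dict (List Int) (PySem.Set (Int × Int)) :=
  L.foldl pvStep d

def pvEmb (l : Int) (pt : Int × List Int) : Int × Int × List Int := (l, pt.1, pt.2)

def pvEvts (lt : Int × List (List Int)) : List (Int × Int × List Int) :=
  (PySem.List.enumerate lt.2).map (pvEmb lt.1)

def pvE (tls : List (List (List Int))) : List (Int × Int × List Int) :=
  (PySem.List.enumerate tls).flatMap pvEvts

def pvOccs (L : List (Int × Int × List Int)) (t : List Int) : List (Int × Int) :=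
  (L.filter (fun e => e.2.2 == t)).map (fun e => (e.1, e.2.1))

def pvLex (a b : Int × Int) : Prop := a.1 < b.1 ∨ (a.1 = b.1 ∧ a.2 < b.2)

def pvChk (F : PySem.Dict (List Int) (PySem.Set (Int × Int))) (e : Int × Int × List Int) : Bool :=
  PySem.List.min2? (F.getD e.2.2 PySem.Set.empty) (fun q => q.1) (fun q => q.2) == some (e.1, e.2.1)

-- A's try/except dict update is exactly Dict.modify
theorem pvStepA_eq (d : PySem.Dict (List Int) (PySem.Set (Int × Int))) (t : List Int) (x : Int × Int) :
    (match d.get? t with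
     | some s => d.insert t (PySem.Set.add s x)
     | none => d.insert t (PySem.Set.add PySem.Set.empty x)) = d.modify t PySem.Set.empty (fun s => PySem.Set.add s x) := by
  cases h : d.get? t <;> simp [PySem.Dict.modify, PySem.Dict.getD, h]

theorem pvFoldl_flatMap {α β γ : Type} (L : List α) (g : α → List β) (f : γ → β → γ) (i : γ) :
    (L.flatMap g).foldl f i = L.foldl (fun a x => (g x).foldl f a) i := by
  induction L generalizing i with
  | nil => rfl
  | cons h tl ih => simp [List.flatMap_cons, List.foldl_append, ih]

-- B's inner per-list loop appends only: shift of the accumulator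
theorem pvInnerB_shift (F : PySem.Dict (List Int) (PySem.Set (Int × Int))) (l : Int)
    (pts : List (Int × List Int)) (a : List (List Int)) (b : List Int) :
    pts.foldl (fun st2 pt => if pvChk F (pvEmb l pt) then (st2.1 ++ [pt.2], st2.2 ++ [pt.1]) else st2) (a, b)
    = (a ++ (pts.foldl (fun st2 pt => if pvChk F (pvEmb l pt) then (st2.1 ++ [pt.2], st2.2 ++ [pt.1]) else st2) ([], [])).1,
       b ++ (pts.foldl (fun st2 pt => if pvChk F (pvEmb l pt) then (st2.1 ++ [pt.2], st2.2 ++ [pt.1]) else st2) ([], [])).2) := by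
  induction pts generalizing a b with
  | nil => simp
  | cons pt rest ih =>
    cases h : pvChk F (pvEmb l pt) <;> simp only [List.foldl_cons, h, if_true, if_false, Bool.false_eq_true]
    · exact ih a b
    · rw [ih, ih ([] ++ [pt.2]) ([] ++ [pt.1])]
      simp

-- joint inner lemma: A's inner loop = dict fold + B's kept lists
theorem pvInner_AB (F : PySem.Dict (List Int) (PySem.Set (Int × Int))) (l : Int) :
    ∀ (pts : List (Int × List Int)) (d : PySem.Dict (List Int) (PySem.Set (Int × Int)))
      (nl : List (List Int)) (np : List Int),
    (∀ pre e post, pts.map (pvEmb l) = pre ++ e :: post →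
        (pvBuild pre d).contains e.2.2 = !pvChk F e) →
    pts.foldl (fun st2 pt =>
        match st2.1.get? pt.2 with
        | some s => (st2.1.insert pt.2 (PySem.Set.add s (l, pt.1)), st2.2.1, st2.2.2)
        | none => (st2.1.insert pt.2 (PySem.Set.add PySem.Set.empty (l, pt.1)),
                   st2.2.1 ++ [pt.2], st2.2.2 ++ [pt.1])) (d, nl, np)
    = (pvBuild (pts.map (pvEmb l)) d,
       nl ++ (pts.foldl (fun st2 pt => if pvChk F (pvEmb l pt) then (st2.1 ++ [pt.2], st2.2 ++ [pt.1]) else st2) ([], [])).1,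
       np ++ (pts.foldl (fun st2 pt => if pvChk F (pvEmb l pt) then (st2.1 ++ [pt.2], st2.2 ++ [pt.1]) else st2) ([], [])).2) := by
  intro pts
  induction pts with
  | nil => intro d nl np _; simp [pvBuild]
  | cons pt rest ih =>
    intro d nl np H
    have h0 := H [] (pvEmb l pt) (rest.map (pvEmb l)) (by simp)
    have hB : pvBuild [] d = d := rfl
    rw [hB] at h0
    have hstep := pvStepA_eq d pt.2 (l, pt.1)
    have H' : ∀ pre e post, rest.map (pvEmb l) = pre ++ e :: post →
        (pvBuild pre (pvStep d (pvEmb l pt))).contains e.2.2 = !pvChk F e := by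
      intro pre e post hdec
      have := H (pvEmb l pt :: pre) e post (by simp [hdec])
      simpa [pvBuild] using this
    cases hc : pvChk F (pvEmb l pt) with
    | true =>
      have hcontains : d.contains pt.2 = false := by
        have h02 : (pvEmb l pt).2.2 = pt.2 := rfl
        rw [h02] at h0; rw [h0, hc]; rfl
      have hget : d.get? pt.2 = none := (PySem.Dict.get?_eq_none_iff_contains d pt.2).mpr hcontains
      have hins : d.insert pt.2 (PySem.Set.add PySem.Set.empty (l, pt.1)) = pvStep d (pvEmb l pt) := by
        have h3 := hstep
        simp only [hget] at h3
        exact h3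
      simp only [List.foldl_cons, hget, hc, if_true]
      rw [hins, ih (pvStep d (pvEmb l pt)) (nl ++ [pt.2]) (np ++ [pt.1]) H']
      rw [pvInnerB_shift F l rest ([] ++ [pt.2]) ([] ++ [pt.1])]
      have h4 : pvBuild (List.map (pvEmb l) (pt :: rest)) d
          = pvBuild (List.map (pvEmb l) rest) (pvStep d (pvEmb l pt)) := by
        simp [pvBuild]
      rw [h4]
      simp
    | false =>
      cases hget : d.get? pt.2 with
      | none =>
        exfalso
        have h5 := (PySem.Dict.get?_eq_none_iff_contains d pt.2).mp hget
        have h02 : (pvEmb l pt).2.2 = pt.2 := rfl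
        rw [h02] at h0
        rw [h5, hc] at h0
        simp at h0
      | some sv =>
        have hins : d.insert pt.2 (PySem.Set.add sv (l, pt.1)) = pvStep d (pvEmb l pt) := by
          have h3 := hstep
          simp only [hget] at h3
          exact h3
        simp only [List.foldl_cons, hget, hc, Bool.false_eq_true, if_false]
        rw [hins, ih (pvStep d (pvEmb l pt)) nl np H']
        have h4 : pvBuild (List.map (pvEmb l) (pt :: rest)) d
            = pvBuild (List.map (pvEmb l) rest) (pvStep d (pvEmb l pt)) := by
          simp [pvBuild]
        rw [h4]

-- B's outer loop appends only: shift of the accumulator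
theorem pvOuterB_shift (F : PySem.Dict (List Int) (PySem.Set (Int × Int)))
    (lts : List (Int × List (List Int))) (P : List (List Int)) (N : List (List (List Int))) :
    lts.foldl (fun st lt =>
        let inner := (PySem.List.enumerate lt.2).foldl
          (fun st2 pt => if pvChk F (pvEmb lt.1 pt) then (st2.1 ++ [pt.2], st2.2 ++ [pt.1]) else st2) ([], [])
        (st.1 ++ [inner.2], st.2 ++ [inner.1])) (P, N)
    = (P ++ (lts.foldl (fun st lt =>
        let inner := (PySem.List.enumerate lt.2).foldl
          (fun st2 pt => if pvChk F (pvEmb lt.1 pt) then (st2.1 ++ [pt.2], st2.2 ++ [pt.1]) else st2) ([], [])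
        (st.1 ++ [inner.2], st.2 ++ [inner.1])) ([], [])).1,
       N ++ (lts.foldl (fun st lt =>
        let inner := (PySem.List.enumerate lt.2).foldl
          (fun st2 pt => if pvChk F (pvEmb lt.1 pt) then (st2.1 ++ [pt.2], st2.2 ++ [pt.1]) else st2) ([], [])
        (st.1 ++ [inner.2], st.2 ++ [inner.1])) ([], [])).2) := by
  induction lts generalizing P N with
  | nil => simp
  | cons lt rest ih =>
    simp only [List.foldl_cons]
    rw [ih, ih ([] ++ [_]) ([] ++ [_])]
    simp

-- joint outer lemma
theorem pvOuter_AB (F : PySem.Dict (List Int) (PySem.Set (Int × Int))) :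
    ∀ (lts : List (Int × List (List Int))) (d : PySem.Dict (List Int) (PySem.Set (Int × Int)))
      (P : List (List Int)) (N : List (List (List Int))),
    (∀ pre e post, lts.flatMap pvEvts = pre ++ e :: post →
        (pvBuild pre d).contains e.2.2 = !pvChk F e) →
    lts.foldl (fun st lt =>
      let inner := (PySem.List.enumerate lt.2).foldl
        (fun st2 pt =>
          match st2.1.get? pt.2 with
          | some s => (st2.1.insert pt.2 (PySem.Set.add s (lt.1, pt.1)), st2.2.1, st2.2.2)
          | none => (st2.1.insert pt.2 (PySem.Set.add PySem.Set.empty (lt.1, pt.1)),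
                     st2.2.1 ++ [pt.2], st2.2.2 ++ [pt.1])) (st.1, [], [])
      (inner.1, st.2.1 ++ [inner.2.2], st.2.2 ++ [inner.2.1])) (d, P, N)
    = (pvBuild (lts.flatMap pvEvts) d,
       P ++ (lts.foldl (fun st lt =>
        let inner := (PySem.List.enumerate lt.2).foldl
          (fun st2 pt => if pvChk F (pvEmb lt.1 pt) then (st2.1 ++ [pt.2], st2.2 ++ [pt.1]) else st2) ([], [])
        (st.1 ++ [inner.2], st.2 ++ [inner.1])) ([], [])).1,
       N ++ (lts.foldl (fun st lt =>
        let inner := (PySem.List.enumerate lt.2).foldl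
          (fun st2 pt => if pvChk F (pvEmb lt.1 pt) then (st2.1 ++ [pt.2], st2.2 ++ [pt.1]) else st2) ([], [])
        (st.1 ++ [inner.2], st.2 ++ [inner.1])) ([], [])).2) := by
  intro lts
  induction lts with
  | nil => intro d P N _; simp [pvBuild]
  | cons lt rest ih =>
    intro d P N H
    have Hinner : ∀ pre e post, (PySem.List.enumerate lt.2).map (pvEmb lt.1) = pre ++ e :: post →
        (pvBuild pre d).contains e.2.2 = !pvChk F e := by
      intro pre e post hdec
      apply H pre e (post ++ rest.flatMap pvEvts)
      rw [List.flatMap_cons]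
      rw [show pvEvts lt = (PySem.List.enumerate lt.2).map (pvEmb lt.1) from rfl, hdec]
      simp
    have H' : ∀ pre e post, rest.flatMap pvEvts = pre ++ e :: post →
        (pvBuild pre (pvBuild (pvEvts lt) d)).contains e.2.2 = !pvChk F e := by
      intro pre e post hdec
      have h6 := H (pvEvts lt ++ pre) e post (by rw [List.flatMap_cons, hdec, List.append_assoc])
      simpa [pvBuild, List.foldl_append] using h6
    simp only [List.foldl_cons]
    rw [pvInner_AB F lt.1 (PySem.List.enumerate lt.2) d [] [] Hinner]
    rw [ih (pvBuild ((PySem.List.enumerate lt.2).map (pvEmb lt.1)) d) (P ++ [_]) (N ++ [_]) H']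
    rw [pvOuterB_shift F rest ([] ++ [_]) ([] ++ [_])]
    have h7 : pvBuild ((lt :: rest).flatMap pvEvts) d
        = pvBuild (rest.flatMap pvEvts) (pvBuild (pvEvts lt) d) := by
      simp [pvBuild, List.flatMap_cons, List.foldl_append]
    rw [h7]
    simp [pvEvts]

-- dict lookup after a build: the occurrence list, provided occurrences are fresh
theorem pvBuild_getD : ∀ (L : List (Int × Int × List Int)) (d : PySem.Dict (List Int) (PySem.Set (Int × Int))) (t : List Int),
    (d.getD t PySem.Set.empty ++ pvOccs L t).Nodup →
    (pvBuild L d).getD t PySem.Set.empty = d.getD t PySem.Set.empty ++ pvOccs L t := by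
  intro L
  induction L with
  | nil => intro d t _; simp [pvBuild, pvOccs]
  | cons e L ih =>
    intro d t hnd
    have hb : pvBuild (e :: L) d = pvBuild L (pvStep d e) := by simp [pvBuild]
    by_cases heq : e.2.2 = t
    · have hocc : pvOccs (e :: L) t = (e.1, e.2.1) :: pvOccs L t := by
        simp [pvOccs, heq]
      rw [hocc] at hnd
      have hx : (e.1, e.2.1) ∉ d.getD t PySem.Set.empty := by
        have := (List.nodup_append.mp hnd).2.2
        intro hmem
        exact this _ hmem _ (by simp) rfl
      have hstep : (pvStep d e).getD t PySem.Set.empty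
          = d.getD t PySem.Set.empty ++ [(e.1, e.2.1)] := by
        have h1 : (pvStep d e).getD t PySem.Set.empty
            = PySem.Set.add (d.getD t PySem.Set.empty) (e.1, e.2.1) := by
          simp [pvStep, heq, PySem.Dict.getD_modify_self]
        rw [h1]
        simp only [PySem.Set.add, PySem.Set.contains]
        rw [if_neg]
        simpa using hx
      have hnd' : ((pvStep d e).getD t PySem.Set.empty ++ pvOccs L t).Nodup := by
        rw [hstep, List.append_assoc]
        simpa using hnd
      rw [hb, ih _ _ hnd', hstep, hocc]
      simp
    · have hocc : pvOccs (e :: L) t = pvOccs L t := by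
        simp [pvOccs, heq]
      have hstep : (pvStep d e).getD t PySem.Set.empty = d.getD t PySem.Set.empty := by
        have h2 := PySem.Dict.getD_modify d e.2.2 t PySem.Set.empty (fun s => PySem.Set.add s (e.1, e.2.1))
        rw [if_neg (fun h => heq (Eq.symm h))] at h2
        simpa [pvStep] using h2
      have hnd' : ((pvStep d e).getD t PySem.Set.empty ++ pvOccs L t).Nodup := by
        rw [hstep]; rw [hocc] at hnd; exact hnd
      rw [hb, ih _ _ hnd', hstep, hocc]

-- membership after a build
theorem pvBuild_contains : ∀ (L : List (Int × Int × List Int)) (d : PySem.Dict (List Int) (PySem.Set (Int × Int))) (t : List Int),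
    (pvBuild L d).contains t = (d.contains t || L.any (fun e => e.2.2 == t)) := by
  intro L
  induction L with
  | nil => intro d t; simp [pvBuild]
  | cons e L ih =>
    intro d t
    have h1 : pvBuild (e :: L) d = pvBuild L (pvStep d e) := by simp [pvBuild]
    rw [h1, ih]
    simp only [pvStep, PySem.Dict.contains_modify, List.any_cons]
    cases h2 : (e.2.2 == t)
    · have h3 : (t == e.2.2) = false := by
        simp only [beq_eq_false_iff_ne] at h2 ⊢; exact fun h => h2 h.symm
      simp [h3]
    · have h3 : (t == e.2.2) = true := by
        simp only [beq_iff_eq] at h2 ⊢; exact h2.symm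
      simp [h3]

-- positions along pvE are strictly lexicographically increasing
theorem pvE_pairwise (tls : List (List (List Int))) :
    (pvE tls).Pairwise (fun a b => pvLex (a.1, a.2.1) (b.1, b.2.1)) := by
  unfold pvE
  rw [List.pairwise_flatMap]
  constructor
  · intro lt _
    unfold pvEvts
    refine (PySem.List.pairwise_lt_enumerate lt.2 0).map (pvEmb lt.1) ?_
    intro a b hab
    exact Or.inr ⟨rfl, hab⟩
  · refine (PySem.List.pairwise_lt_enumerate tls 0).imp ?_
    intro a b hab x hx y hy
    unfold pvEvts at hx hy
    obtain ⟨pa, _, rfl⟩ := List.mem_map.mp hx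
    obtain ⟨pb, _, rfl⟩ := List.mem_map.mp hy
    exact Or.inl hab

-- min of a list whose head is lexicographically below the tail
theorem pvMin2_head (x : Int × Int) (xs : List (Int × Int)) (h : ∀ y ∈ xs, pvLex x y) :
    PySem.List.min2? (x :: xs) (fun q => q.1) (fun q => q.2) = some x := by
  induction xs with
  | nil => rfl
  | cons y rest ih =>
    have hy := h y (by simp)
    have hcond : (decide (y.1 < x.1) || !decide (x.1 < y.1) && decide (y.2 < x.2)) = false := by
      rcases hy with h1 | ⟨h1, h2⟩ <;> simp <;> omega
    have ihx := ih (fun z hz => h z (by simp [hz]))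
    simp only [PySem.List.min2?, List.foldl_cons] at ihx ⊢
    simp only [hcond, Bool.false_eq_true, if_false]
    exact ihx

-- the crux: the inline seen-before test agrees with the table-driven min test
theorem pvKeepEquiv (tls : List (List (List Int))) :
    ∀ pre e post, pvE tls = pre ++ e :: post →
      (pvBuild pre PySem.Dict.empty).contains e.2.2 = !pvChk (pvBuild (pvE tls) PySem.Dict.empty) e := by
  intro pre e post hE
  have hp : (pvE tls).Pairwise (fun a b => pvLex (a.1, a.2.1) (b.1, b.2.1)) := pvE_pairwise tls
  -- the occurrence list of e.2.2 is pairwise-lex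
  have hq : (pvOccs (pvE tls) e.2.2).Pairwise pvLex := by
    unfold pvOccs
    exact (hp.filter _).map _ (fun a b h => h)
  have hlexne : ∀ (a b : Int × Int), pvLex a b → a ≠ b := by
    intro a b h hab
    subst hab
    rcases h with h1 | ⟨h1, h2⟩ <;> omega
  have hnd : (pvOccs (pvE tls) e.2.2).Nodup := hq.imp (fun h => hlexne _ _ h)
  have hgd0 : (PySem.Dict.empty : PySem.Dict (List Int) (PySem.Set (Int × Int))).getD e.2.2 PySem.Set.empty = [] := rfl
  have hfull : (pvBuild (pvE tls) PySem.Dict.empty).getD e.2.2 PySem.Set.empty = pvOccs (pvE tls) e.2.2 := by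
    rw [pvBuild_getD (pvE tls) PySem.Dict.empty e.2.2 (by rw [hgd0]; simpa using hnd), hgd0]
    simp
  have hsplit : pvOccs (pvE tls) e.2.2 = pvOccs pre e.2.2 ++ (e.1, e.2.1) :: pvOccs post e.2.2 := by
    rw [hE]
    simp [pvOccs, List.filter_append]
  have hcont : (pvBuild pre PySem.Dict.empty).contains e.2.2
      = pre.any (fun e' => e'.2.2 == e.2.2) := by
    rw [pvBuild_contains pre PySem.Dict.empty e.2.2]
    simp [PySem.Dict.empty, PySem.Dict.contains]
  rw [hsplit] at hq
  cases hany : pre.any (fun e' => e'.2.2 == e.2.2) with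
  | false =>
    have hpre : pvOccs pre e.2.2 = [] := by
      unfold pvOccs
      rw [List.filter_eq_nil_iff.mpr, List.map_nil]
      intro a ha
      have := List.any_eq_false.mp hany a ha
      simpa using this
    rw [hpre] at hsplit hq
    have hmin : PySem.List.min2? (pvOccs (pvE tls) e.2.2) (fun q => q.1) (fun q => q.2) = some (e.1, e.2.1) := by
      rw [hsplit]
      exact pvMin2_head _ _ (by simpa using (List.pairwise_cons.mp hq).1)
    have hchk : pvChk (pvBuild (pvE tls) PySem.Dict.empty) e = true := by
      unfold pvChk
      rw [hfull, hmin]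
      simp
    rw [hcont, hany, hchk]
    rfl
  | true =>
    obtain ⟨e', he'mem, he'⟩ := List.any_eq_true.mp hany
    have hpre : pvOccs pre e.2.2 ≠ [] := by
      unfold pvOccs
      simp only [ne_eq, List.map_eq_nil_iff, List.filter_eq_nil_iff, not_forall]
      exact ⟨e', he'mem, by simpa using he'⟩
    obtain ⟨q, tail, htail⟩ := List.exists_cons_of_ne_nil hpre
    rw [htail] at hsplit hq
    have hmin : PySem.List.min2? (pvOccs (pvE tls) e.2.2) (fun q => q.1) (fun q => q.2) = some q := by
      rw [hsplit]
      exact pvMin2_head _ _ (List.pairwise_cons.mp hq).1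
    have hqne : q ≠ (e.1, e.2.1) := by
      apply hlexne
      exact (List.pairwise_cons.mp hq).1 _ (by simp)
    have hchk : pvChk (pvBuild (pvE tls) PySem.Dict.empty) e = false := by
      unfold pvChk
      rw [hfull, hmin]
      simpa using hqne
    rw [hcont, hany, hchk]
    rfl

-- ===== VERDICT (by name: the statement is the Claim_ definition above) =====
theorem disjoinTrajectorySets_spec : Claim_equal_disjoinTrajectorySets := by
  intro tls _
  show disjoinTrajectorySets tls = disjoinTrajectorySets_alt tls
  have hstep : ∀ (d : PySem.Dict (List Int) (PySem.Set (Int × Int))) (lt : Int × List (List Int)),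
      (pvEvts lt).foldl pvStep d
      = (PySem.List.enumerate lt.2).foldl
          (fun d pt => d.modify pt.2 PySem.Set.empty (fun s => PySem.Set.add s (lt.1, pt.1))) d := by
    intro d lt
    unfold pvEvts
    rw [List.foldl_map]
    rfl
  have hd : ((PySem.List.enumerate tls).foldl
      (fun d lt => (PySem.List.enumerate lt.2).foldl
          (fun d pt => d.modify pt.2 PySem.Set.empty (fun s => PySem.Set.add s (lt.1, pt.1))) d)
      (PySem.Dict.empty : PySem.Dict (List Int) (PySem.Set (Int × Int))))
      = pvBuild (pvE tls) PySem.Dict.empty := by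
    unfold pvE pvBuild
    rw [pvFoldl_flatMap]
    rw [show (fun (a : PySem.Dict (List Int) (PySem.Set (Int × Int))) (x : Int × List (List Int)) => (pvEvts x).foldl pvStep a)
        = (fun d lt => (PySem.List.enumerate lt.2).foldl
            (fun d pt => d.modify pt.2 PySem.Set.empty (fun s => PySem.Set.add s (lt.1, pt.1))) d)
      from funext (fun a => funext (fun x => hstep a x))]
  have houter := pvOuter_AB (pvBuild (pvE tls) PySem.Dict.empty) (PySem.List.enumerate tls)
    PySem.Dict.empty [] [] (fun pre e post h => pvKeepEquiv tls pre e post h)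
  simp only [disjoinTrajectorySets, disjoinTrajectorySets_alt]
  rw [hd, houter]
  rfl
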